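-- pv_equiv track=rewrite | github.com/evgenijja/programiranje-1 | 2. IZPIT.PY | najvecji_zaboj
-- ===== SOURCE A (Python) =====
-- zabojniki = [1, 3, 4, 7, 10]
--
-- def candidates(n):
--     return [zaboj for zaboj in zabojniki if zaboj <= n]
--
-- def najvecji_zaboj(n):
--     if n == 0:
--         return []
--     cands = candidates(n)
--     if cands == []:
--         raise RuntimeError("no solution found")
--     largest_candidate = max(cands)
--     s = najvecji_zaboj(n - largest_candidate)
--     return s + [largest_candidate]
-- ===== SOURCE B (Python) =====
-- zabojniki = [1, 3, 4, 7, 10]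
--
-- def najvecji_zaboj(n):
--     if n < 0:
--         raise RuntimeError("no solution found")
--     counts = {}
--     remaining = n
--     for z in sorted(zabojniki, reverse=True):
--         counts[z], remaining = divmod(remaining, z)
--     result = []
--     for z in zabojniki:
--         result.extend([z] * counts[z])
--     return result
-- ===== Notes on version B (the rewrite author's own statement) =====
-- stated objective: faster
-- what changed: Replaces A's one-container-at-a-time recursion with a single pass of divmod per denomination (largest first), then builds the ascending result from the counts.
import Mathlib
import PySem

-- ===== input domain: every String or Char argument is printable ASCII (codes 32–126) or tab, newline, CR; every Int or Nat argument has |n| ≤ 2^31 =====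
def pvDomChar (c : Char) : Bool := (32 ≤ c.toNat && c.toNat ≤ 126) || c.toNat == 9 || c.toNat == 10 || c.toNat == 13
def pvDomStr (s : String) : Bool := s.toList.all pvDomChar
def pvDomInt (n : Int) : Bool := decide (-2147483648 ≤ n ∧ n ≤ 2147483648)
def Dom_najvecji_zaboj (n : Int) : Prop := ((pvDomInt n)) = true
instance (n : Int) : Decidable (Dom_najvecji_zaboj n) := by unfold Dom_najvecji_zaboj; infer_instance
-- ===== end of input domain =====

-- B replaces A's one-container-at-a-time recursion by one divmod per denomination
-- (largest first), then emits the counts in ascending order (constant number of arithmetic steps).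

-- ===== PORT A =====
def zabojniki : List Int := [1, 3, 4, 7, 10]

def candidates (n : Int) : List Int := zabojniki.filter (fun zaboj => zaboj ≤ n)

-- A's recursion, with a fuel ≥ n.toNat + 1; fuel exhaustion is unreachable because each
-- recursive call strictly decreases n towards 0 (the largest candidate is ≥ 1 and ≤ n).
def najvecji_zaboj_go (fuel : Nat) (n : Int) : List Int :=
  match fuel with
  | 0 => []
  | fuel + 1 =>
    if n = 0 then []
    else
      match PySem.List.max? (candidates n) (fun x => x) with
      | none => []  -- cands == []: Python raises RuntimeError (outside Pre_)
      | some largest_candidate =>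
        najvecji_zaboj_go fuel (n - largest_candidate) ++ [largest_candidate]

def najvecji_zaboj (n : Int) : List Int := najvecji_zaboj_go (n.toNat + 1) n

-- ===== PORT B =====
def najvecji_zaboj_alt (n : Int) : List Int :=
  if n < 0 then []  -- Python raises RuntimeError here (outside Pre_)
  else
    let counts : PySem.Dict Int Int :=
      ([10, 7, 4, 3, 1] : List Int).foldl
        (fun (acc : PySem.Dict Int Int × Int) z =>
          (acc.1.insert z (PySem.Int.floordiv acc.2 z), PySem.Int.mod acc.2 z))
        (PySem.Dict.empty, n) |>.1
    zabojniki.foldl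
      (fun result z => result ++ PySem.List.pyRepeat [z] (counts.getD z 0)) []

-- ===== PRECONDITION & SPEC =====
-- Pre_ excludes exactly n < 0, where A raises RuntimeError (B raises there too).
def Pre_najvecji_zaboj (n : Int) : Prop := 0 ≤ n
instance (n : Int) : Decidable (Pre_najvecji_zaboj n) := by unfold Pre_najvecji_zaboj; infer_instance
def pvWitness_najvecji_zaboj : Int := 25

def Spec_najvecji_zaboj (n : Int) (out : List Int) : Prop := out = najvecji_zaboj_alt n
instance (n : Int) (out : List Int) : Decidable (Spec_najvecji_zaboj n out) := by unfold Spec_najvecji_zaboj; infer_instance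

-- ===== CLAIM (what is proved, stated in full; the proofs are below) =====
def Claim_equal_najvecji_zaboj : Prop := ∀ (n : Int), Dom_najvecji_zaboj n → Pre_najvecji_zaboj n → Spec_najvecji_zaboj n (najvecji_zaboj n)

-- ===== LEMMAS AND PROOFS =====

-- the common closed form: greedy counts by successive divmod, emitted in ascending order
def specForm (m : Nat) : List Int :=
  List.replicate (m % 10 % 7 % 4 % 3) 1 ++ List.replicate (m % 10 % 7 % 4 / 3) 3 ++
  List.replicate (m % 10 % 7 / 4) 4 ++ List.replicate (m % 10 / 7) 7 ++
  List.replicate (m / 10) 10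

lemma goA_spec : ∀ (f m : Nat), m < f → najvecji_zaboj_go f (m : Int) = specForm m := by
  intro f
  induction f with
  | zero => intro m hm; omega
  | succ f ih =>
    intro m hm
    by_cases h0 : m = 0
    · subst h0; simp [najvecji_zaboj_go, specForm]
    by_cases h10 : 10 ≤ m
    · have hc : PySem.List.max? (candidates (m : Int)) (fun x => x) = some 10 := by
        have hfil : candidates (m : Int) = [1, 3, 4, 7, 10] := by
          simp [candidates, zabojniki, List.filter, show 1 ≤ m by omega, show 3 ≤ m by omega,
            show 4 ≤ m by omega, show 7 ≤ m by omega, h10]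
        rw [hfil, PySem.List.max?_id_cons]; rfl
      rw [najvecji_zaboj_go, if_neg (by exact_mod_cast h0)]
      simp only [hc]
      rw [show ((m : Int) - 10) = ((m - 10 : Nat) : Int) by omega, ih (m - 10) (by omega)]
      simp only [specForm]
      rw [show (m - 10) % 10 = m % 10 by omega, show (m - 10) / 10 = m / 10 - 1 by omega]
      rw [show m / 10 = (m / 10 - 1) + 1 by omega, List.replicate_succ']
      simp
    · by_cases h7 : 7 ≤ m
      · have hc : PySem.List.max? (candidates (m : Int)) (fun x => x) = some 7 := by
          have hfil : candidates (m : Int) = [1, 3, 4, 7] := by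
            simp [candidates, zabojniki, List.filter, show 1 ≤ m by omega, show 3 ≤ m by omega,
              show 4 ≤ m by omega, h7, show ¬ (10 ≤ m) by omega]
          rw [hfil, PySem.List.max?_id_cons]; rfl
        rw [najvecji_zaboj_go, if_neg (by exact_mod_cast h0)]
        simp only [hc]
        rw [show ((m : Int) - 7) = ((m - 7 : Nat) : Int) by omega, ih (m - 7) (by omega)]
        simp only [specForm]
        rw [show (m - 7) % 10 % 7 % 4 % 3 = m % 10 % 7 % 4 % 3 by omega,
          show (m - 7) % 10 % 7 % 4 / 3 = m % 10 % 7 % 4 / 3 by omega,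
          show (m - 7) % 10 % 7 / 4 = m % 10 % 7 / 4 by omega,
          show (m - 7) % 10 / 7 = 0 by omega, show (m - 7) / 10 = 0 by omega,
          show m % 10 / 7 = 1 by omega, show m / 10 = 0 by omega]
        simp
      · by_cases h4 : 4 ≤ m
        · have hc : PySem.List.max? (candidates (m : Int)) (fun x => x) = some 4 := by
            have hfil : candidates (m : Int) = [1, 3, 4] := by
              simp [candidates, zabojniki, List.filter, show 1 ≤ m by omega, show 3 ≤ m by omega,
                h4, show ¬ (7 ≤ m) by omega, show ¬ (10 ≤ m) by omega]
            rw [hfil, PySem.List.max?_id_cons]; rfl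
          rw [najvecji_zaboj_go, if_neg (by exact_mod_cast h0)]
          simp only [hc]
          rw [show ((m : Int) - 4) = ((m - 4 : Nat) : Int) by omega, ih (m - 4) (by omega)]
          simp only [specForm]
          rw [show (m - 4) % 10 % 7 % 4 % 3 = m % 10 % 7 % 4 % 3 by omega,
            show (m - 4) % 10 % 7 % 4 / 3 = m % 10 % 7 % 4 / 3 by omega,
            show (m - 4) % 10 % 7 / 4 = 0 by omega, show (m - 4) % 10 / 7 = 0 by omega,
            show (m - 4) / 10 = 0 by omega, show m % 10 % 7 / 4 = 1 by omega,
            show m % 10 / 7 = 0 by omega, show m / 10 = 0 by omega]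
          simp
        · by_cases h3 : 3 ≤ m
          · have hc : PySem.List.max? (candidates (m : Int)) (fun x => x) = some 3 := by
              have hfil : candidates (m : Int) = [1, 3] := by
                simp [candidates, zabojniki, List.filter, show 1 ≤ m by omega, h3,
                  show ¬ (4 ≤ m) by omega, show ¬ (7 ≤ m) by omega, show ¬ (10 ≤ m) by omega]
              rw [hfil, PySem.List.max?_id_cons]; rfl
            rw [najvecji_zaboj_go, if_neg (by exact_mod_cast h0)]
            simp only [hc]
            rw [show ((m : Int) - 3) = ((m - 3 : Nat) : Int) by omega, ih (m - 3) (by omega)]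
            simp only [specForm]
            rw [show (m - 3) % 10 % 7 % 4 % 3 = 0 by omega, show (m - 3) % 10 % 7 % 4 / 3 = 0 by omega,
              show (m - 3) % 10 % 7 / 4 = 0 by omega, show (m - 3) % 10 / 7 = 0 by omega,
              show (m - 3) / 10 = 0 by omega, show m % 10 % 7 % 4 % 3 = 0 by omega,
              show m % 10 % 7 % 4 / 3 = 1 by omega, show m % 10 % 7 / 4 = 0 by omega,
              show m % 10 / 7 = 0 by omega, show m / 10 = 0 by omega]
            simp
          · -- 1 ≤ m < 3
            have hc : PySem.List.max? (candidates (m : Int)) (fun x => x) = some 1 := by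
              have hfil : candidates (m : Int) = [1] := by
                simp [candidates, zabojniki, List.filter, show 1 ≤ m by omega,
                  show ¬ (3 ≤ m) by omega, show ¬ (4 ≤ m) by omega,
                  show ¬ (7 ≤ m) by omega, show ¬ (10 ≤ m) by omega]
              rw [hfil, PySem.List.max?_id_cons]; rfl
            rw [najvecji_zaboj_go, if_neg (by exact_mod_cast h0)]
            simp only [hc]
            have hm12 : m = 1 ∨ m = 2 := by omega
            rcases hm12 with h | h <;> subst h
            · rw [show (((1 : Nat) : Int) - 1) = ((0 : Nat) : Int) by norm_num, ih 0 (by omega)]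
              norm_num [specForm, List.replicate]
            · rw [show (((2 : Nat) : Int) - 1) = ((1 : Nat) : Int) by norm_num, ih 1 (by omega)]
              norm_num [specForm, List.replicate]

lemma alt_spec (m : Nat) : najvecji_zaboj_alt (m : Int) = specForm m := by
  rw [najvecji_zaboj_alt, if_neg (by omega)]
  simp [zabojniki, List.foldl, PySem.Dict.getD, PySem.Dict.get?, PySem.Dict.empty,
    PySem.Dict.insert, PySem.List.pyRepeat, specForm]
  norm_cast

-- ===== VERDICT (by name: the statement is the Claim_ definition above) =====
theorem najvecji_zaboj_spec : Claim_equal_najvecji_zaboj := by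
  intro n _ hpre
  have h0 : (0 : Int) ≤ n := hpre
  have hm : n = ((n.toNat : Nat) : Int) := by omega
  unfold Spec_najvecji_zaboj najvecji_zaboj
  rw [hm, goA_spec _ _ (by omega), alt_spec]
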